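-- pv_equiv track=rewrite | github.com/awer1014/Project-AI-JAVA-ANNOTATION-2021 | Side-Project/meteor/code/keras_performer/performer_ver_3_tf2.py | _get_max_suffix_repeat_times
-- ===== SOURCE A (Python) =====
-- def _get_max_suffix_repeat_times(tokens, max_len):
--     detect_len = min(max_len, len(tokens))
--     next = [-1] * detect_len
--     k = -1
--     for i in range(1, detect_len):
--         while k >= 0 and tokens[len(tokens) - i - 1] != tokens[len(tokens) - k - 2]:
--             k = next[k]
--         if tokens[len(tokens) - i - 1] == tokens[len(tokens) - k - 2]:
--             k += 1
--         next[i] = k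
--     max_repeat = 1
--     for i in range(2, detect_len):
--         if next[i] >= 0 and (i + 1) % (i - next[i]) == 0:
--             max_repeat = max(max_repeat, (i + 1) // (i - next[i]))
--     return max_repeat
-- ===== SOURCE B (Python) =====
-- def _get_max_suffix_repeat_times(tokens, max_len):
--     # Instead of A's incremental KMP failure-function array, treat each suffix
--     # length independently: find the smallest period p of the reversed suffix
--     # by direct scanning (first p at which all positions match their shift),
--     # and count repeats when p divides the length.
--     detect_len = min(max_len, len(tokens))
--     rev = tokens[::-1]
--     best = 1
--     for L in range(3, detect_len + 1):
--         p = 1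
--         while p < L and any(rev[j] != rev[j - p] for j in range(p, L)):
--             p += 1
--         if L % p == 0:
--             best = max(best, L // p)
--     return best
-- ===== Notes on version B (the rewrite author's own statement) =====
-- stated objective: alternative
-- what changed: A incrementally builds a KMP failure-function array over the reversed suffix and reads repeat counts off it; B treats each suffix length L independently, finding the smallest period of the reversed suffix by directly scanning candidate shifts p = 1, 2, ... until every position matches its shift, with no failure array and no backtracking state.
import Mathlib
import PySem

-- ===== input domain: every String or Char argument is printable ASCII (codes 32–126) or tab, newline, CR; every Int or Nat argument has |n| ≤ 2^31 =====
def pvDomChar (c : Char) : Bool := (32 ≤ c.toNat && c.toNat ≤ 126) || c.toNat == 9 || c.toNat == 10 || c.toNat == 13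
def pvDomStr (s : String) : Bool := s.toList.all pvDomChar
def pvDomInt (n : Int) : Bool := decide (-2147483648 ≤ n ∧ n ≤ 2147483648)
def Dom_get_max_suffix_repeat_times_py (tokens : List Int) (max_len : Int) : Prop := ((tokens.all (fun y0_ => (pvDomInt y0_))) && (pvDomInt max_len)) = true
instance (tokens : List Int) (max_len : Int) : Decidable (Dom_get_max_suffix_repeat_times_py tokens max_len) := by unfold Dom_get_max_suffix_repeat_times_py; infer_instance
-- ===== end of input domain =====

-- B replaces A's incremental KMP failure-function computation by an independent
-- naive longest-border scan for each suffix length (simpler to read, quadratic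
-- instead of linear per suffix; objective: alternative, not faster).

-- ===== PORT A =====
-- A's inner `while k >= 0 and ...: k = next[k]` loop; fuel (k.toNat + 2) merely
-- makes the same computation total — the proof shows it is never exhausted.
def pvWhileA (tokens nxt : List Int) (i k : Int) : Nat → Int
  | 0 => k
  | fuel + 1 =>
    if k ≥ 0 ∧ PySem.List.pyGetD tokens ((tokens.length : Int) - i - 1) 0 ≠
               PySem.List.pyGetD tokens ((tokens.length : Int) - k - 2) 0 then
      pvWhileA tokens nxt i (PySem.List.pyGetD nxt k 0) fuel
    else k

def get_max_suffix_repeat_times_py (tokens : List Int) (max_len : Int) : Int :=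
  let detect_len : Int := min max_len (tokens.length : Int)
  -- indexing is total here: all indices are provably in range, so pyGetD is exact
  let st :=
    (PySem.List.pyRange 1 detect_len 1).foldl
      (fun (st : List Int × Int) (i : Int) =>
        let k1 := pvWhileA tokens st.1 i st.2 (st.2.toNat + 2)
        let k2 := if PySem.List.pyGetD tokens ((tokens.length : Int) - i - 1) 0 =
                     PySem.List.pyGetD tokens ((tokens.length : Int) - k1 - 2) 0
                  then k1 + 1 else k1
        (PySem.List.pySetD st.1 i k2, k2))
      (List.replicate detect_len.toNat (-1), -1)
  (PySem.List.pyRange 2 detect_len 1).foldl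
    (fun (mr : Int) (i : Int) =>
      let ni := PySem.List.pyGetD st.1 i 0
      if ni ≥ 0 ∧ PySem.Int.mod (i + 1) (i - ni) = 0 then
        max mr (PySem.Int.floordiv (i + 1) (i - ni))
      else mr)
    1

-- ===== PORT B =====
-- B's `while p < L and any(rev[j] != rev[j - p] for j in range(p, L)): p += 1`
def pvPeriodSearch (rev : List Int) (L p : Int) : Int :=
  if h : p < L ∧ ¬ ((PySem.List.pyRange p L 1).all
      (fun j => PySem.List.pyGetD rev j 0 == PySem.List.pyGetD rev (j - p) 0) = true) then
    pvPeriodSearch rev L (p + 1)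
  else p
termination_by (L - p).toNat
decreasing_by omega

def get_max_suffix_repeat_times_py_alt (tokens : List Int) (max_len : Int) : Int :=
  let detect_len : Int := min max_len (tokens.length : Int)
  let rev := (PySem.List.slice? tokens none none (-1)).getD []   -- tokens[::-1]
  (PySem.List.pyRange 3 (detect_len + 1) 1).foldl
    (fun (best : Int) (L : Int) =>
      let p := pvPeriodSearch rev L 1
      if PySem.Int.mod L p = 0 then max best (PySem.Int.floordiv L p) else best)
    1

-- ===== PRECONDITION & SPEC =====
def Spec_get_max_suffix_repeat_times_py (tokens : List Int) (max_len : Int) (out : Int) : Prop := out = get_max_suffix_repeat_times_py_alt tokens max_len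
instance (tokens : List Int) (max_len : Int) (out : Int) : Decidable (Spec_get_max_suffix_repeat_times_py tokens max_len out) := by unfold Spec_get_max_suffix_repeat_times_py; infer_instance

-- ===== CLAIM (what is proved, stated in full; the proofs are below) =====
def Claim_equal_get_max_suffix_repeat_times_py : Prop := ∀ (tokens : List Int) (max_len : Int), Dom_get_max_suffix_repeat_times_py tokens max_len → Spec_get_max_suffix_repeat_times_py tokens max_len (get_max_suffix_repeat_times_py tokens max_len)

-- ===== LEMMAS AND PROOFS =====

-- b is a (proper) border of the length-L prefix of xs, as a Bool
def borderB (xs : List Int) (L b : Nat) : Bool :=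
  decide (b < L) && (List.range b).all (fun j => xs.getD (L - b + j) 0 == xs.getD j 0)

lemma borderB_iff {xs : List Int} {L b : Nat} :
    borderB xs L b = true ↔ b < L ∧ ∀ j < b, xs.getD (L - b + j) 0 = xs.getD j 0 := by
  simp [borderB, List.all_eq_true]

-- longest proper border of the length-L prefix
def mB (xs : List Int) (L : Nat) : Nat := Nat.findGreatest (fun b => borderB xs L b = true) L

lemma border_zero {xs : List Int} {L : Nat} (h : 0 < L) : borderB xs L 0 = true := by
  simp [borderB_iff, h]

lemma mB_border {xs : List Int} {L : Nat} (h : 0 < L) : borderB xs L (mB xs L) = true := by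
  unfold mB
  exact Nat.findGreatest_spec (P := fun b => borderB xs L b = true) (Nat.zero_le L) (border_zero h)

lemma mB_lt {xs : List Int} {L : Nat} (h : 0 < L) : mB xs L < L :=
  (borderB_iff.mp (mB_border h)).1

lemma mB_ge {xs : List Int} {L b : Nat} (h : borderB xs L b = true) : b ≤ mB xs L := by
  unfold mB
  exact Nat.le_findGreatest (P := fun b => borderB xs L b = true) (Nat.le_of_lt (borderB_iff.mp h).1) h

lemma mB_one (xs : List Int) : mB xs 1 = 0 := by
  have h1 : ¬ borderB xs 1 1 = true := by simp [borderB_iff]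
  simp [mB, h1]

lemma border_trans {xs : List Int} {i b c : Nat}
    (h1 : borderB xs i b = true) (h2 : borderB xs b c = true) : borderB xs i c = true := by
  rw [borderB_iff] at h1 h2 ⊢
  obtain ⟨hb, H1⟩ := h1
  obtain ⟨hc, H2⟩ := h2
  refine ⟨by omega, fun j hj => ?_⟩
  have e1 : i - c + j = i - b + (b - c + j) := by omega
  have e2 : b - c + j < b := by omega
  rw [e1, H1 _ e2, H2 _ hj]

lemma border_sub {xs : List Int} {i b c : Nat}
    (h1 : borderB xs i b = true) (h2 : borderB xs i c = true) (hcb : c < b) :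
    borderB xs b c = true := by
  rw [borderB_iff] at h1 h2 ⊢
  obtain ⟨hb, H1⟩ := h1
  obtain ⟨hc, H2⟩ := h2
  refine ⟨hcb, fun j hj => ?_⟩
  have e2 : b - c + j < b := by omega
  have e1 : i - b + (b - c + j) = i - c + j := by omega
  rw [← H2 _ hj, ← e1, H1 _ e2]

lemma border_succ_iff {xs : List Int} {i b : Nat} (_hi : 1 ≤ i) :
    borderB xs (i + 1) (b + 1) = true ↔
      borderB xs i b = true ∧ xs.getD i 0 = xs.getD b 0 := by
  rw [borderB_iff, borderB_iff]
  constructor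
  · rintro ⟨hlt, H⟩
    refine ⟨⟨by omega, fun j hj => ?_⟩, ?_⟩
    · have := H j (by omega)
      have e : i + 1 - (b + 1) + j = i - b + j := by omega
      rwa [e] at this
    · have := H b (by omega)
      have e : i + 1 - (b + 1) + b = i := by omega
      rwa [e] at this
  · rintro ⟨⟨hlt, H⟩, hx⟩
    refine ⟨by omega, fun j hj => ?_⟩
    rcases Nat.lt_or_ge j b with hjb | hjb
    · have e : i + 1 - (b + 1) + j = i - b + j := by omega
      rw [e]; exact H j hjb
    · have hjb' : j = b := by omega
      subst hjb'
      have e : i + 1 - (j + 1) + j = i := by omega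
      rw [e]; exact hx

-- reverse indexing bridge: tokens[len - j - 1] is (reverse tokens)[j]
lemma idx_rev (tokens : List Int) (j : Nat) (h : j < tokens.length) :
    PySem.List.pyGetD tokens ((tokens.length : Int) - (j : Int) - 1) 0 =
      tokens.reverse.getD j 0 := by
  have e : (tokens.length : Int) - (j : Int) - 1 = ((tokens.length - 1 - j : Nat) : Int) := by
    omega
  rw [e, PySem.List.pyGetD_natCast]
  have h1 : tokens.length - 1 - j < tokens.length := by omega
  have h2 : j < tokens.reverse.length := by simpa using h
  rw [List.getD_eq_getElem _ _ h1, List.getD_eq_getElem _ _ h2, List.getElem_reverse]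

-- KMP step: starting from k = (b:Int) - 1 with b a border of prefix i and
-- mB (i+1) ≤ b + 1, the while loop followed by the match-increment computes mB (i+1) - 1
lemma kmp_step (tokens nxt : List Int) (i b fuel : Nat)
    (hi : 1 ≤ i) (hilen : i < tokens.length)
    (hnxt : ∀ j : Nat, j < i → nxt.getD j 0 = (mB tokens.reverse (j + 1) : Int) - 1)
    (hb : borderB tokens.reverse i b = true)
    (hub : mB tokens.reverse (i + 1) ≤ b + 1)
    (hf : b < fuel) :
    (if PySem.List.pyGetD tokens ((tokens.length : Int) - (i : Int) - 1) 0 =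
        PySem.List.pyGetD tokens ((tokens.length : Int) - (pvWhileA tokens nxt (i : Int) ((b : Int) - 1) fuel) - 2) 0
     then pvWhileA tokens nxt (i : Int) ((b : Int) - 1) fuel + 1
     else pvWhileA tokens nxt (i : Int) ((b : Int) - 1) fuel) =
      (mB tokens.reverse (i + 1) : Int) - 1 := by
  induction b using Nat.strong_induction_on generalizing fuel with
  | _ b IH =>
  obtain ⟨f, rfl⟩ : ∃ f, fuel = f + 1 := ⟨fuel - 1, by omega⟩
  have hblt : b < i := (borderB_iff.mp hb).1
  have hxi : PySem.List.pyGetD tokens ((tokens.length : Int) - (i : Int) - 1) 0 =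
      tokens.reverse.getD i 0 := idx_rev tokens i hilen
  have hxb : PySem.List.pyGetD tokens ((tokens.length : Int) - ((b : Int) - 1) - 2) 0 =
      tokens.reverse.getD b 0 := by
    have e : (tokens.length : Int) - ((b : Int) - 1) - 2 = (tokens.length : Int) - (b : Int) - 1 := by
      ring
    rw [e]; exact idx_rev tokens b (by omega)
  rw [pvWhileA]
  by_cases hmatch : tokens.reverse.getD i 0 = tokens.reverse.getD b 0
  · have hcond : ¬ (((b : Int) - 1) ≥ 0 ∧
        PySem.List.pyGetD tokens ((tokens.length : Int) - (i : Int) - 1) 0 ≠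
        PySem.List.pyGetD tokens ((tokens.length : Int) - ((b : Int) - 1) - 2) 0) := by
      rintro ⟨-, hne⟩
      exact hne (by rw [hxi, hxb]; exact hmatch)
    rw [if_neg hcond]
    rw [if_pos (by rw [hxi, hxb]; exact hmatch)]
    have h1 : borderB tokens.reverse (i + 1) (b + 1) = true :=
      (border_succ_iff hi).mpr ⟨hb, hmatch⟩
    have h2 := mB_ge h1
    have h3 : mB tokens.reverse (i + 1) = b + 1 := by omega
    rw [h3]; push_cast; ring
  · by_cases hb0 : b = 0
    · subst hb0
      have hcond : ¬ ((((0 : Nat) : Int) - 1) ≥ 0 ∧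
          PySem.List.pyGetD tokens ((tokens.length : Int) - (i : Int) - 1) 0 ≠
          PySem.List.pyGetD tokens ((tokens.length : Int) - (((0 : Nat) : Int) - 1) - 2) 0) := by
        rintro ⟨h0, -⟩
        simp at h0
      rw [if_neg hcond]
      rw [if_neg (by rw [hxi, hxb]; exact hmatch)]
      have h0 : mB tokens.reverse (i + 1) = 0 := by
        by_contra hne
        have h1 : mB tokens.reverse (i + 1) = 1 := by omega
        have h2 := mB_border (xs := tokens.reverse) (L := i + 1) (by omega)
        rw [h1] at h2
        have h3 := (border_succ_iff (b := 0) hi).mp h2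
        exact hmatch h3.2
      rw [h0]
    · have hbpos : 0 < b := by omega
      have hcond : (((b : Int) - 1) ≥ 0 ∧
          PySem.List.pyGetD tokens ((tokens.length : Int) - (i : Int) - 1) 0 ≠
          PySem.List.pyGetD tokens ((tokens.length : Int) - ((b : Int) - 1) - 2) 0) := by
        refine ⟨by omega, ?_⟩
        rw [hxi, hxb]; exact hmatch
      rw [if_pos hcond]
      have hk' : PySem.List.pyGetD nxt ((b : Int) - 1) 0 = (mB tokens.reverse b : Int) - 1 := by
        have e : (b : Int) - 1 = ((b - 1 : Nat) : Int) := by omega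
        rw [e, PySem.List.pyGetD_natCast]
        have h4 := hnxt (b - 1) (by omega)
        have e2 : b - 1 + 1 = b := by omega
        rw [e2] at h4
        exact h4
      rw [hk']
      have hb'b : mB tokens.reverse b < b := mB_lt hbpos
      have hbord : borderB tokens.reverse i (mB tokens.reverse b) = true :=
        border_trans hb (mB_border hbpos)
      have hub' : mB tokens.reverse (i + 1) ≤ mB tokens.reverse b + 1 := by
        rcases Nat.eq_zero_or_pos (mB tokens.reverse (i + 1)) with hc | hc
        · omega
        · obtain ⟨c, hcEq⟩ : ∃ c, mB tokens.reverse (i + 1) = c + 1 := ⟨mB tokens.reverse (i + 1) - 1, by omega⟩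
          have h2 := mB_border (xs := tokens.reverse) (L := i + 1) (by omega)
          rw [hcEq] at h2
          have h3 := (border_succ_iff hi).mp h2
          have hcb : c < b := by
            rcases Nat.lt_or_ge c b with h | h
            · exact h
            · have : c = b := by omega
              subst this
              exact absurd h3.2 hmatch
          have h5 := mB_ge (border_sub hb h3.1 hcb)
          omega
      exact IH _ hb'b f hbord hub' (by omega)

lemma mB_succ_le {xs : List Int} {i : Nat} (hi : 1 ≤ i) :
    mB xs (i + 1) ≤ mB xs i + 1 := by
  rcases Nat.eq_zero_or_pos (mB xs (i + 1)) with hc | hc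
  · omega
  · obtain ⟨c, hcEq⟩ : ∃ c, mB xs (i + 1) = c + 1 := ⟨mB xs (i + 1) - 1, by omega⟩
    have h2 := mB_border (xs := xs) (L := i + 1) (by omega)
    rw [hcEq] at h2
    have h3 := (border_succ_iff hi).mp h2
    have := mB_ge h3.1
    omega

-- invariant of A's outer `for i in range(1, detect_len)` loop
lemma foldA (tokens : List Int) (d : Nat) (hd : d ≤ tokens.length) :
    ∀ m : Nat, m + 1 ≤ d →
    ∃ nxt : List Int,
      (PySem.List.pyRange 1 ((m : Int) + 1) 1).foldl
        (fun (st : List Int × Int) (i : Int) =>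
          let k1 := pvWhileA tokens st.1 i st.2 (st.2.toNat + 2)
          let k2 := if PySem.List.pyGetD tokens ((tokens.length : Int) - i - 1) 0 =
                       PySem.List.pyGetD tokens ((tokens.length : Int) - k1 - 2) 0
                    then k1 + 1 else k1
          (PySem.List.pySetD st.1 i k2, k2))
        (List.replicate d (-1), -1)
      = (nxt, (mB tokens.reverse (m + 1) : Int) - 1) ∧
      nxt.length = d ∧
      ∀ j ≤ m, nxt.getD j 0 = (mB tokens.reverse (j + 1) : Int) - 1 := by
  intro m
  induction m with
  | zero =>
    intro hm
    refine ⟨List.replicate d (-1), ?_, ?_, ?_⟩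
    · rw [PySem.List.pyRange_one_eq_nil (by omega)]
      simp [mB_one]
    · simp
    · intro j hj
      have hj0 : j = 0 := by omega
      subst hj0
      rw [List.getD_eq_getElem _ _ (by simpa using (by omega : 0 < d))]
      simp [mB_one]
  | succ m IH =>
    intro hm
    obtain ⟨nxt, hfold, hlen, hget⟩ := IH (by omega)
    have hrw : PySem.List.pyRange 1 (((m + 1 : Nat) : Int) + 1) 1
        = PySem.List.pyRange 1 ((m : Int) + 1) 1 ++ [(m : Int) + 1] := by
      have e : ((m + 1 : Nat) : Int) + 1 = ((m : Int) + 1) + 1 := by push_cast; ring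
      rw [e, PySem.List.pyRange_one_succ_right (by omega)]
    rw [hrw, List.foldl_append, hfold]
    have ei : ((m + 1 : Nat) : Int) = (m : Int) + 1 := by push_cast; ring
    have hstep := kmp_step tokens nxt (m + 1) (mB tokens.reverse (m + 1))
      (((mB tokens.reverse (m + 1) : Int) - 1).toNat + 2)
      (by omega) (by omega)
      (fun j hj => hget j (by omega))
      (mB_border (by omega))
      (mB_succ_le (by omega))
      (by omega)
    rw [ei] at hstep
    simp only [List.foldl_cons, List.foldl_nil]
    refine ⟨PySem.List.pySetD nxt ((m : Int) + 1)
      ((mB tokens.reverse (m + 1 + 1) : Int) - 1), ?_, ?_, ?_⟩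
    · dsimp only
      rw [hstep]
    · rw [← ei, PySem.List.pySetD_natCast, List.length_set, hlen]
    · intro j hj
      rw [← ei, PySem.List.pySetD_natCast]
      rcases Nat.lt_or_ge j (m + 1) with hjm | hjm
      · rw [List.getD_eq_getElem _ _ (by rw [List.length_set, hlen]; omega),
            List.getElem_set_ne (by omega),
            ← List.getD_eq_getElem _ _ (by rw [hlen]; omega)]
        exact hget j (by omega)
      · have hje : j = m + 1 := by omega
        subst hje
        rw [List.getD_eq_getElem _ _ (by rw [List.length_set, hlen]; omega)]
        simp

-- the shift-match check in B's period search is exactly the border property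
lemma all_period_iff (rev : List Int) (L p : Nat) (hp : 1 ≤ p) (hpL : p ≤ L) :
    ((PySem.List.pyRange (p : Int) (L : Int) 1).all
      (fun j => PySem.List.pyGetD rev j 0 == PySem.List.pyGetD rev (j - (p : Int)) 0) = true)
    ↔ borderB rev L (L - p) = true := by
  rw [List.all_eq_true, borderB_iff]
  constructor
  · intro H
    refine ⟨by omega, fun j hj => ?_⟩
    have h1 := H ((p + j : Nat) : Int)
      (by rw [PySem.List.mem_pyRange_one]; omega)
    have e1 : ((p + j : Nat) : Int) - (p : Int) = ((j : Nat) : Int) := by push_cast; ring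
    rw [e1, PySem.List.pyGetD_natCast, PySem.List.pyGetD_natCast] at h1
    have e2 : L - (L - p) + j = p + j := by omega
    rw [e2]
    exact beq_iff_eq.mp h1
  · intro H j hj
    rw [PySem.List.mem_pyRange_one] at hj
    obtain ⟨j', rfl⟩ : ∃ j' : Nat, j = (j' : Int) := ⟨j.toNat, by omega⟩
    have e1 : (j' : Int) - (p : Int) = ((j' - p : Nat) : Int) := by omega
    rw [e1, PySem.List.pyGetD_natCast, PySem.List.pyGetD_natCast]
    have h3 := H.2 (j' - p) (by omega)
    have e2 : L - (L - p) + (j' - p) = j' := by omega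
    rw [e2] at h3
    exact beq_iff_eq.mpr h3

-- B's search finds the smallest period, which is L minus the longest border
lemma periodSearch_correct (rev : List Int) (L : Nat) (hL : 1 ≤ L) :
    ∀ n p : Nat, 1 ≤ p → p ≤ L - mB rev L → L - p = n →
    pvPeriodSearch rev (L : Int) (p : Int) = ((L - mB rev L : Nat) : Int) := by
  intro n
  induction n using Nat.strong_induction_on with
  | _ n IH =>
  intro p hp1 hple hn
  have hmlt : mB rev L < L := mB_lt hL
  rw [pvPeriodSearch]
  by_cases hcase : p = L - mB rev L
  · subst hcase
    have hall : (PySem.List.pyRange ((L - mB rev L : Nat) : Int) (L : Int) 1).all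
        (fun j => PySem.List.pyGetD rev j 0 == PySem.List.pyGetD rev (j - ((L - mB rev L : Nat) : Int)) 0) = true := by
      rw [all_period_iff rev L (L - mB rev L) (by omega) (by omega)]
      have e : L - (L - mB rev L) = mB rev L := by omega
      rw [e]
      exact mB_border hL
    rw [dif_neg (by rintro ⟨-, hno⟩; exact hno hall)]
  · have hlt : p < L - mB rev L := by omega
    have hnall : ¬ ((PySem.List.pyRange ((p : Nat) : Int) (L : Int) 1).all
        (fun j => PySem.List.pyGetD rev j 0 == PySem.List.pyGetD rev (j - ((p : Nat) : Int)) 0) = true) := by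
      rw [all_period_iff rev L p (by omega) (by omega)]
      intro hB
      have := mB_ge hB
      omega
    rw [dif_pos ⟨by push_cast; omega, hnall⟩]
    have e : ((p : Nat) : Int) + 1 = ((p + 1 : Nat) : Int) := by push_cast; ring
    rw [e]
    exact IH (L - (p + 1)) (by omega) (p + 1) (by omega) (by omega) rfl

-- two folds agree when their steps agree on accumulators ≥ 1 and preserve ≥ 1
lemma fold_eq_inv {α : Type} (f g : Int → α → Int) (l : List α)
    (h : ∀ acc x, x ∈ l → 1 ≤ acc → f acc x = g acc x ∧ 1 ≤ f acc x) :
    ∀ a : Int, 1 ≤ a → l.foldl f a = l.foldl g a := by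
  induction l with
  | nil => intro a _; rfl
  | cons x l IH =>
    intro a ha
    simp only [List.foldl_cons]
    obtain ⟨he, hge⟩ := h a x (by simp) ha
    rw [← he]
    exact IH (fun acc y hy hacc => h acc y (by simp [hy]) hacc) _ hge

-- ===== VERDICT (by name: the statement is the Claim_ definition above) =====
theorem get_max_suffix_repeat_times_py_spec : Claim_equal_get_max_suffix_repeat_times_py := by
  intro tokens max_len _
  unfold Spec_get_max_suffix_repeat_times_py
  unfold get_max_suffix_repeat_times_py get_max_suffix_repeat_times_py_alt
  simp only [PySem.List.slice?_none_none_neg_one, Option.getD_some]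
  set dl : Int := min max_len (tokens.length : Int) with hdl
  by_cases h2 : dl ≤ 2
  · rw [PySem.List.pyRange_one_eq_nil h2, PySem.List.pyRange_one_eq_nil (by omega : dl + 1 ≤ 3)]
    rfl
  · have hd3i : 3 ≤ dl := by omega
    have hdleni : dl ≤ (tokens.length : Int) := min_le_right _ _
    have hd3 : 3 ≤ dl.toNat := by omega
    have hdle : dl.toNat ≤ tokens.length := by omega
    obtain ⟨nxt, hfold, hlen, hget⟩ := foldA tokens dl.toNat hdle (dl.toNat - 1) (by omega)
    have eup : ((dl.toNat - 1 : Nat) : Int) + 1 = dl := by omega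
    rw [eup] at hfold
    rw [hfold]
    set d : Nat := dl.toNat with hdd
    have hcast : dl = (d : Int) := by omega
    rw [hcast]
    rw [PySem.List.pyRange_one 2 (d : Int), PySem.List.pyRange_one 3 ((d : Int) + 1)]
    have en : ((d : Int) - 2).toNat = d - 2 := by omega
    have en2 : ((d : Int) + 1 - 3).toNat = d - 2 := by omega
    rw [en, en2]
    rw [List.foldl_map, List.foldl_map]
    refine fold_eq_inv _ _ _ ?_ 1 (by norm_num)
    intro acc k hk hacc
    simp only [List.mem_range] at hk
    dsimp only
    have ei : (2 + (k : Int)) = ((k + 2 : Nat) : Int) := by push_cast; ring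
    have hni : PySem.List.pyGetD nxt (2 + (k : Int)) 0 = (mB tokens.reverse (k + 3) : Int) - 1 := by
      rw [ei, PySem.List.pyGetD_natCast]
      have h5 := hget (k + 2) (by omega)
      have e5 : k + 2 + 1 = k + 3 := by omega
      rw [e5] at h5
      exact h5
    rw [hni]
    have hB0lt : mB tokens.reverse (k + 3) < k + 3 := mB_lt (by omega)
    have hsearch := periodSearch_correct tokens.reverse (k + 3) (by omega)
      (k + 3 - 1) 1 (by omega) (by omega) rfl
    have e1cast : ((1 : Nat) : Int) = (1 : Int) := by norm_num
    rw [e1cast] at hsearch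
    have eL : (3 + (k : Int)) = ((k + 3 : Nat) : Int) := by push_cast; ring
    rw [eL, hsearch]
    have ea1 : (2 + (k : Int) + 1) = ((k + 3 : Nat) : Int) := by push_cast; ring
    have ea2 : (2 + (k : Int) - ((mB tokens.reverse (k + 3) : Int) - 1))
        = ((k + 3 - mB tokens.reverse (k + 3) : Nat) : Int) := by omega
    rw [ea1, ea2, PySem.Int.mod_natCast, PySem.Int.floordiv_natCast]
    by_cases hB00 : mB tokens.reverse (k + 3) = 0
    · rw [hB00]
      have hmod : ((((k + 3) % (k + 3 - 0)) : Nat) : Int) = 0 := by simp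
      refine ⟨?_, ?_⟩
      · rw [if_neg (by rintro ⟨h0, -⟩; simp at h0), if_pos hmod]
        have hdiv : ((((k + 3) / (k + 3 - 0)) : Nat) : Int) = 1 := by simp
        rw [hdiv, max_eq_left hacc]
      · rw [if_neg (by rintro ⟨h0, -⟩; simp at h0)]
        exact hacc
    · refine ⟨?_, ?_⟩
      · split_ifs with hA hB hB
        · rfl
        · exact absurd hA.2 hB
        · exact absurd ⟨by omega, hB⟩ hA
        · rfl
      · split_ifs with hA
        · exact le_trans hacc (le_max_left _ _)
        · exact hacc
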